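-- pv_equiv track=rewrite | github.com/PawelManczak/Master-thesis | second part/source/experiments/compare_datasets.py | compare_pattern_sets
-- ===== SOURCE A (Python) =====
-- from typing import Dict, List, Set, Tuple
--
-- def compare_pattern_sets(patterns_dict: Dict[str, Set[str]]) -> Dict[str, Set[str]]:
--     """Porównuje zbiory wzorców."""
--     datasets = list(patterns_dict.keys())
--     result = {}
--
--     # Wspólne dla wszystkich
--     if len(datasets) >= 2:
--         common_all = patterns_dict[datasets[0]].copy()
--         for ds in datasets[1:]:
--             common_all &= patterns_dict[ds]
--         result['common_all'] = common_all
--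
--     # Wspólne dla par
--     for i, ds1 in enumerate(datasets):
--         for ds2 in datasets[i+1:]:
--             key = f"common_{ds1}_{ds2}"
--             common = patterns_dict[ds1] & patterns_dict[ds2]
--             result[key] = common
--
--     # Unikalne dla każdego
--     for ds in datasets:
--         others = set()
--         for other_ds in datasets:
--             if other_ds != ds:
--                 others |= patterns_dict[other_ds]
--         result[f"unique_{ds}"] = patterns_dict[ds] - others
--
--     return result
-- ===== SOURCE B (Python) =====
-- def compare_pattern_sets(patterns_dict):
--     """Porownuje zbiory wzorcow."""
--     datasets = list(patterns_dict.keys())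
--     n = len(datasets)
--
--     # one inverted index: pattern -> set of datasets containing it
--     owners = {}
--     for ds, patterns in patterns_dict.items():
--         for p in patterns:
--             owners.setdefault(p, set()).add(ds)
--
--     result = {}
--     if n >= 2:
--         result['common_all'] = {p for p in patterns_dict[datasets[0]]
--                                 if len(owners[p]) == n}
--     for i, ds1 in enumerate(datasets):
--         for ds2 in datasets[i + 1:]:
--             result[f"common_{ds1}_{ds2}"] = {p for p in patterns_dict[ds1]
--                                              if ds2 in owners[p]}
--     for ds in datasets:
--         result[f"unique_{ds}"] = {p for p in patterns_dict[ds]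
--                                   if len(owners[p]) == 1}
--     return result
-- ===== Notes on version B (the rewrite author's own statement) =====
-- stated objective: alternative
-- what changed: A recomputes set relations per section (for 'unique' a union of all other datasets per dataset); B builds one inverted index owners: pattern -> set of datasets in a single pass and reads common_all, every pairwise common and every unique set off that index by a count/membership test.
import Mathlib
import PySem

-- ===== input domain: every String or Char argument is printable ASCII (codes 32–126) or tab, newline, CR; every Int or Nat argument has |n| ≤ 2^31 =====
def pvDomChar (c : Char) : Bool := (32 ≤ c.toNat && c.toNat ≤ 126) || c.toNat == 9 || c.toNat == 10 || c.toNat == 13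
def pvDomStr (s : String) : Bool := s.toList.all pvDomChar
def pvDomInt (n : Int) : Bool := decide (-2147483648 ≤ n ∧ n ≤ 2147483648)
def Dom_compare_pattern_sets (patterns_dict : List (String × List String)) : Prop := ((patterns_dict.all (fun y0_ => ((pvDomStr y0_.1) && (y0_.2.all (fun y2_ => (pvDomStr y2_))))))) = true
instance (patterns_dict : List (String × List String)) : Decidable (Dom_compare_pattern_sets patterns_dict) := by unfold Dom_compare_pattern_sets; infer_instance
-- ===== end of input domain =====

-- B replaces A's per-dataset union-of-all-others (and per-pair/per-common rescans) by ONE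
-- inverted index owners : pattern → set of datasets, from which all three sections are read off.

-- ===== PORT A =====
-- patterns_dict[ds] is ported as getD … [] : ds always comes from the dict's own keys, so the
-- KeyError branch of the Python subscript is unreachable and the default is never used.
def compare_pattern_sets (patterns_dict : List (String × List String)) : List (String × List String) :=
  let pd := PySem.Dict.ofList patterns_dict
  let datasets := pd.keys
  let result : PySem.Dict String (List String) := PySem.Dict.empty
  let result :=
    if 2 ≤ datasets.length then
      let common_all :=
        (PySem.List.slice datasets (some 1) none).foldl
          (fun c ds => PySem.Set.inter c (pd.getD ds []))
          (pd.getD (PySem.List.pyGetD datasets 0 "") [])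
      result.insert "common_all" common_all
    else result
  let result :=
    (PySem.List.enumerate datasets).foldl
      (fun r q =>
        (PySem.List.slice datasets (some (q.1 + 1)) none).foldl
          (fun r ds2 =>
            r.insert ("common_" ++ q.2 ++ "_" ++ ds2)
              (PySem.Set.inter (pd.getD q.2 []) (pd.getD ds2 [])))
          r)
      result
  let result :=
    datasets.foldl
      (fun r ds =>
        let others :=
          datasets.foldl
            (fun o other => if other ≠ ds then PySem.Set.union o (pd.getD other []) else o)
            PySem.Set.empty
        r.insert ("unique_" ++ ds) (PySem.Set.diff (pd.getD ds []) others))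
      result
  result.items

-- ===== PORT B =====
-- owners.setdefault(p, set()).add(ds) mutates the set stored at p in place:
-- ported as insert of the enlarged set (Set.add of the current value, [] when absent).
def compare_pattern_sets_alt (patterns_dict : List (String × List String)) : List (String × List String) :=
  let pd := PySem.Dict.ofList patterns_dict
  let datasets := pd.keys
  let n := datasets.length
  let owners :=
    pd.items.foldl
      (fun d e => e.2.foldl (fun d p => d.insert p (PySem.Set.add (d.getD p []) e.1)) d)
      PySem.Dict.empty
  let result : PySem.Dict String (List String) := PySem.Dict.empty
  let result :=
    if 2 ≤ n then
      result.insert "common_all"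
        ((pd.getD (PySem.List.pyGetD datasets 0 "") []).filter
          (fun p => (owners.getD p []).length == n))
    else result
  let result :=
    (PySem.List.enumerate datasets).foldl
      (fun r q =>
        (PySem.List.slice datasets (some (q.1 + 1)) none).foldl
          (fun r ds2 =>
            r.insert ("common_" ++ q.2 ++ "_" ++ ds2)
              ((pd.getD q.2 []).filter
                (fun p => PySem.Set.contains (owners.getD p []) ds2)))
          r)
      result
  let result :=
    datasets.foldl
      (fun r ds =>
        r.insert ("unique_" ++ ds)
          ((pd.getD ds []).filter (fun p => (owners.getD p []).length == 1)))
      result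
  result.items

-- ===== PRECONDITION & SPEC =====
-- Pre_ requires the association list to be a faithful image of A's Python argument, a dict of
-- sets: distinct keys and distinct elements in each value list; on other lists Python collapses
-- the duplicates before A runs, so the list-level behaviour is an artefact of the encoding.
def Pre_compare_pattern_sets (patterns_dict : List (String × List String)) : Prop :=
  (patterns_dict.map Prod.fst).Nodup ∧ ∀ e ∈ patterns_dict, e.2.Nodup
instance (patterns_dict : List (String × List String)) : Decidable (Pre_compare_pattern_sets patterns_dict) := by unfold Pre_compare_pattern_sets; infer_instance
def pvWitness_compare_pattern_sets : (List (String × List String)) :=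
  [("a", ["x", "y"]), ("b", ["y", "z"])]
def Spec_compare_pattern_sets (patterns_dict : List (String × List String)) (out : List (String × List String)) : Prop := out = compare_pattern_sets_alt patterns_dict
instance (patterns_dict : List (String × List String)) (out : List (String × List String)) : Decidable (Spec_compare_pattern_sets patterns_dict out) := by unfold Spec_compare_pattern_sets; infer_instance

-- ===== CLAIM (what is proved, stated in full; the proofs are below) =====
def Claim_equal_compare_pattern_sets : Prop := ∀ (patterns_dict : List (String × List String)), Dom_compare_pattern_sets patterns_dict → Pre_compare_pattern_sets patterns_dict → Spec_compare_pattern_sets patterns_dict (compare_pattern_sets patterns_dict)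

-- ===== LEMMAS AND PROOFS =====

-- the dict a Nodup-key association list denotes is the list itself
lemma pv_ofList_eq {l : List (String × List String)} (hk : (l.map Prod.fst).Nodup) :
    PySem.Dict.ofList l = PySem.Dict.mk l := by
  apply PySem.Dict.ext
  have h := PySem.Dict.items_foldl_insert_fresh l Prod.fst Prod.snd PySem.Dict.empty
    (fun a _ => PySem.Dict.contains_empty a.1) hk
  simpa using h

-- lookup of an entry's key returns its value
lemma pv_getD_mem {L : List (String × List String)} (hk : (L.map Prod.fst).Nodup)
    {ds : String} {s : List String} (h : (ds, s) ∈ L) :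
    (PySem.Dict.mk L).getD ds [] = s :=
  PySem.Dict.getD_of_mem_items _ h (by simpa [PySem.Dict.keys] using hk) []

-- two entries with the same key are one entry
lemma pv_key_inj {L : List (String × List String)} (hk : (L.map Prod.fst).Nodup)
    {a b : String × List String} (ha : a ∈ L) (hb : b ∈ L) (h : a.1 = b.1) : a = b :=
  List.inj_on_of_nodup_map hk ha hb h

-- the inner loop of B's index build: one dataset ds over its (distinct) patterns
lemma pv_owners_inner (ds : String) (pats : List String) :
    ∀ (d : PySem.Dict String (List String)) (q : String), pats.Nodup →
      (∀ r ∈ pats, ds ∉ d.getD r []) →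
      (pats.foldl (fun d p => d.insert p (PySem.Set.add (d.getD p []) ds)) d).getD q [] =
        if q ∈ pats then d.getD q [] ++ [ds] else d.getD q [] := by
  induction pats with
  | nil => intro d q _ _; simp
  | cons p rest ih =>
    intro d q hnd hfresh
    have hp : d.insert p (PySem.Set.add (d.getD p []) ds) =
        d.insert p (d.getD p [] ++ [ds]) := by
      rw [PySem.Set.add_of_not_mem (hfresh p (by simp))]
    simp only [List.foldl_cons, hp]
    rw [ih _ q (List.Nodup.of_cons hnd) ?fresh]
    case fresh =>
      intro r hr
      have hrp : r ≠ p := by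
        rintro rfl; exact (List.nodup_cons.mp hnd).1 hr
      rw [PySem.Dict.getD_insert]
      simp [hrp]
      exact hfresh r (by simp [hr])
    by_cases hq : q ∈ rest
    · have hqp : q ≠ p := by rintro rfl; exact (List.nodup_cons.mp hnd).1 hq
      simp [hq, hqp, PySem.Dict.getD_insert]
    · by_cases hqp : q = p
      · subst hqp; simp [hq, PySem.Dict.getD_insert]
      · simp [hq, hqp, PySem.Dict.getD_insert]

-- the whole index build appends, per pattern q, the keys of the entries containing q, in order
lemma pv_owners_outer (L : List (String × List String)) :
    ∀ (d : PySem.Dict String (List String)) (q : String),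
      (L.map Prod.fst).Nodup → (∀ e ∈ L, e.2.Nodup) →
      (∀ (r : String), ∀ k ∈ L.map Prod.fst, k ∉ d.getD r []) →
      (L.foldl (fun d e => e.2.foldl (fun d p => d.insert p (PySem.Set.add (d.getD p []) e.1)) d)
          d).getD q [] =
        d.getD q [] ++ (L.filter (fun e => e.2.contains q)).map Prod.fst := by
  induction L with
  | nil => intro d q _ _ _; simp
  | cons e rest ih =>
    intro d q hk hv hfresh
    simp only [List.foldl_cons]
    have h1 : ∀ (r : String),
        (e.2.foldl (fun d p => d.insert p (PySem.Set.add (d.getD p []) e.1)) d).getD r [] =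
          if r ∈ e.2 then d.getD r [] ++ [e.1] else d.getD r [] := by
      intro r
      exact pv_owners_inner e.1 e.2 d r (hv e (by simp))
        (fun r hr => hfresh r e.1 (by simp))
    have hkc : (e.1 :: rest.map Prod.fst).Nodup := by simpa using hk
    rw [ih _ q hkc.of_cons (fun a ha => hv a (by simp [ha])) ?fresh]
    case fresh =>
      intro r k hkrest
      rw [h1 r]
      have hk1 : k ≠ e.1 := by
        rintro rfl
        exact (List.nodup_cons.mp hkc).1 hkrest
      have hk2 : k ∉ d.getD r [] := hfresh r k (by simp [hkrest])
      split <;> simp [hk1, hk2]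
    rw [h1 q]
    by_cases hq : q ∈ e.2
    · simp [hq, List.append_assoc]
    · simp [hq]

-- the intersection loop of A is one filter
lemma pv_inter_fold (ks : List String) :
    ∀ (s : List String) (g : String → List String),
      ks.foldl (fun c ds => PySem.Set.inter c (g ds)) s =
        s.filter (fun x => ks.all (fun ds => (g ds).contains x)) := by
  induction ks with
  | nil => intro s g; simp
  | cons k ks ih =>
    intro s g
    rw [List.foldl_cons,
      show PySem.Set.inter s (g k) = s.filter (fun x => (g k).contains x) from rfl,
      ih, List.filter_filter]
    apply List.filter_congr
    intro x _
    simp [List.all_cons, Bool.and_comm]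

-- membership in A's union-of-others loop
lemma pv_union_fold (ks : List String) :
    ∀ (o : List String) (ds0 : String) (g : String → List String) (x : String),
      (x ∈ ks.foldl (fun o other => if other ≠ ds0 then PySem.Set.union o (g other) else o) o ↔
        x ∈ o ∨ ∃ k ∈ ks, k ≠ ds0 ∧ x ∈ g k) := by
  induction ks with
  | nil => intro o ds0 g x; simp
  | cons k ks ih =>
    intro o ds0 g x
    simp only [List.foldl_cons]
    by_cases hk : k ≠ ds0
    · rw [if_pos hk]
      simp only [ih, PySem.Set.mem_union]
      constructor
      · rintro (⟨h | h⟩ | ⟨j, hj, hne, hx⟩)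
        · exact Or.inl h
        · exact Or.inr ⟨k, by simp, hk, h⟩
        · exact Or.inr ⟨j, by simp [hj], hne, hx⟩
      · rintro (h | ⟨j, hj, hne, hx⟩)
        · exact Or.inl (Or.inl h)
        · rcases List.mem_cons.mp hj with rfl | hj
          · exact Or.inl (Or.inr hx)
          · exact Or.inr ⟨j, hj, hne, hx⟩
    · rw [if_neg hk]
      simp only [ih]
      constructor
      · rintro (h | ⟨j, hj, hne, hx⟩)
        · exact Or.inl h
        · exact Or.inr ⟨j, by simp [hj], hne, hx⟩
      · rintro (h | ⟨j, hj, hne, hx⟩)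
        · exact Or.inl h
        · rcases List.mem_cons.mp hj with rfl | hj
          · exact absurd hne (by simpa using hk)
          · exact Or.inr ⟨j, hj, hne, hx⟩

-- B's owners index, named for the proofs (definitionally the fold in port B)
def pvOwners (L : List (String × List String)) : PySem.Dict String (List String) :=
  L.foldl
    (fun d e => e.2.foldl (fun d p => d.insert p (PySem.Set.add (d.getD p []) e.1)) d)
    PySem.Dict.empty

lemma pv_owners_getD (L : List (String × List String)) (hk : (L.map Prod.fst).Nodup)
    (hv : ∀ e ∈ L, e.2.Nodup) (p : String) :
    (pvOwners L).getD p [] = (L.filter (fun e => e.2.contains p)).map Prod.fst := by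
  have h := pv_owners_outer L PySem.Dict.empty p hk hv (by intro r k _; simp)
  simpa [pvOwners] using h

lemma pv_owners_len (L : List (String × List String)) (p : String) :
    ((L.filter (fun e => e.2.contains p)).map Prod.fst).length =
      L.countP (fun e => e.2.contains p) := by
  simp [List.countP_eq_length_filter]

lemma pv_mem_keys {L : List (String × List String)} {ds : String}
    (h : ds ∈ L.map Prod.fst) : ∃ s, (ds, s) ∈ L := by
  obtain ⟨a, ha, rfl⟩ := List.mem_map.mp h
  exact ⟨a.2, ha⟩

lemma pv_pyGetD_zero (xs : List String) (d : String) :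
    PySem.List.pyGetD xs 0 d = xs.getD 0 d := by
  simpa using PySem.List.pyGetD_natCast xs 0 d

-- pointwise fact for the common_all section
lemma pv_common_pt (e : String × List String) (rest : List (String × List String))
    (hk : ((e :: rest).map Prod.fst).Nodup) (p : String) (hp : p ∈ e.2) :
    ((rest.map Prod.fst).all (fun ds => ((PySem.Dict.mk (e :: rest)).getD ds []).contains p)) =
      (((e :: rest).countP (fun a => a.2.contains p)) == (e :: rest).length) := by
  rw [Bool.eq_iff_iff, beq_iff_eq, List.countP_eq_length, List.all_eq_true]
  constructor
  · intro hall a ha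
    rcases List.mem_cons.mp ha with rfl | ha
    · simpa using hp
    · have := hall a.1 (List.mem_map.mpr ⟨a, ha, rfl⟩)
      rwa [pv_getD_mem hk (show (a.1, a.2) ∈ e :: rest from List.mem_cons_of_mem _ ha)] at this
  · intro hall ds hds
    have hds' : ds ∈ (e :: rest).map Prod.fst := List.mem_cons_of_mem e.1 hds
    obtain ⟨s, hs⟩ := pv_mem_keys hds'
    rw [pv_getD_mem hk hs]
    exact hall (ds, s) hs

-- pointwise fact for the pairwise section
lemma pv_pair_pt (L : List (String × List String)) (hk : (L.map Prod.fst).Nodup)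
    {ds2 : String} {s2 : List String} (h2 : (ds2, s2) ∈ L) (p : String) :
    s2.contains p = ((L.filter (fun e => e.2.contains p)).map Prod.fst).contains ds2 := by
  rw [Bool.eq_iff_iff, List.contains_iff_mem, List.contains_iff_mem]
  constructor
  · intro hp
    exact List.mem_map.mpr ⟨(ds2, s2), List.mem_filter.mpr ⟨h2, by simpa using hp⟩, rfl⟩
  · intro hmem
    obtain ⟨a, ha, ha1⟩ := List.mem_map.mp hmem
    obtain ⟨haL, hac⟩ := List.mem_filter.mp ha
    have : a = (ds2, s2) := pv_key_inj hk haL h2 (by simpa using ha1)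
    subst this
    simpa using hac

-- pointwise fact for the unique section
lemma pv_unique_pt (L : List (String × List String)) (hk : (L.map Prod.fst).Nodup)
    {ds : String} {s : List String} (h : (ds, s) ∈ L) (p : String) (hp : p ∈ s) :
    (L.countP (fun e => e.2.contains p) = 1 ↔ ¬ ∃ a ∈ L, a.1 ≠ ds ∧ p ∈ a.2) := by
  obtain ⟨l1, l2, rfl⟩ := List.append_of_mem h
  have hnd : (l1.map Prod.fst ++ ds :: l2.map Prod.fst).Nodup := by simpa using hk
  obtain ⟨nd1, nd2, disj⟩ := List.nodup_append.mp hnd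
  have hds1 : ∀ a ∈ l1, a.1 ≠ ds := by
    intro a ha hads
    exact disj ds (List.mem_map.mpr ⟨a, ha, hads⟩) ds (by simp) rfl
  have hds2 : ∀ a ∈ l2, a.1 ≠ ds := by
    intro a ha hads
    exact (List.nodup_cons.mp nd2).1 (List.mem_map.mpr ⟨a, ha, hads⟩)
  have hcnt : (l1 ++ (ds, s) :: l2).countP (fun e => e.2.contains p) =
      l1.countP (fun e => e.2.contains p) + l2.countP (fun e => e.2.contains p) + 1 := by
    have hc : ((ds, s).2.contains p) = true := by simpa using hp
    simp [List.countP_append, List.countP_cons, hc, hp]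
    omega
  rw [hcnt]
  constructor
  · intro h1
    rintro ⟨a, ha, hane, hap⟩
    have hz1 : l1.countP (fun e => e.2.contains p) = 0 := by omega
    have hz2 : l2.countP (fun e => e.2.contains p) = 0 := by omega
    rcases List.mem_append.mp ha with ha | ha
    · exact (List.countP_eq_zero.mp hz1 a ha) (by simpa using hap)
    · rcases List.mem_cons.mp ha with rfl | ha
      · exact hane rfl
      · exact (List.countP_eq_zero.mp hz2 a ha) (by simpa using hap)
  · intro hno
    have hz1 : l1.countP (fun e => e.2.contains p) = 0 := by
      rw [List.countP_eq_zero]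
      intro a ha hc
      exact hno ⟨a, by simp [ha], hds1 a ha, by simpa using hc⟩
    have hz2 : l2.countP (fun e => e.2.contains p) = 0 := by
      rw [List.countP_eq_zero]
      intro a ha hc
      exact hno ⟨a, by simp [ha], hds2 a ha, by simpa using hc⟩
    omega

lemma pv_main (L : List (String × List String)) (hk : (L.map Prod.fst).Nodup)
    (hv : ∀ e ∈ L, e.2.Nodup) :
    ((PySem.Dict.mk L).keys.foldl
        (fun r ds =>
          r.insert ("unique_" ++ ds)
            (PySem.Set.diff ((PySem.Dict.mk L).getD ds [])
              ((PySem.Dict.mk L).keys.foldl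
                (fun o other =>
                  if other ≠ ds then PySem.Set.union o ((PySem.Dict.mk L).getD other []) else o)
                PySem.Set.empty)))
        ((PySem.List.enumerate (PySem.Dict.mk L).keys).foldl
          (fun r q =>
            (PySem.List.slice (PySem.Dict.mk L).keys (some (q.1 + 1)) none).foldl
              (fun r ds2 =>
                r.insert ("common_" ++ q.2 ++ "_" ++ ds2)
                  (PySem.Set.inter ((PySem.Dict.mk L).getD q.2 [])
                    ((PySem.Dict.mk L).getD ds2 [])))
              r)
          (if 2 ≤ (PySem.Dict.mk L).keys.length then
            PySem.Dict.empty.insert "common_all"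
              ((PySem.List.slice (PySem.Dict.mk L).keys (some 1) none).foldl
                (fun c ds => PySem.Set.inter c ((PySem.Dict.mk L).getD ds []))
                ((PySem.Dict.mk L).getD (PySem.List.pyGetD (PySem.Dict.mk L).keys 0 "") []))
          else PySem.Dict.empty))).items
    =
    ((PySem.Dict.mk L).keys.foldl
        (fun r ds =>
          r.insert ("unique_" ++ ds)
            (((PySem.Dict.mk L).getD ds []).filter
              (fun p => ((pvOwners L).getD p []).length == 1)))
        ((PySem.List.enumerate (PySem.Dict.mk L).keys).foldl
          (fun r q =>
            (PySem.List.slice (PySem.Dict.mk L).keys (some (q.1 + 1)) none).foldl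
              (fun r ds2 =>
                r.insert ("common_" ++ q.2 ++ "_" ++ ds2)
                  (((PySem.Dict.mk L).getD q.2 []).filter
                    (fun p => PySem.Set.contains ((pvOwners L).getD p []) ds2)))
              r)
          (if 2 ≤ (PySem.Dict.mk L).keys.length then
            PySem.Dict.empty.insert "common_all"
              (((PySem.Dict.mk L).getD (PySem.List.pyGetD (PySem.Dict.mk L).keys 0 "") []).filter
                (fun p => ((pvOwners L).getD p []).length == (PySem.Dict.mk L).keys.length))
          else PySem.Dict.empty))).items := by
  have h1 : (if 2 ≤ (PySem.Dict.mk L).keys.length then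
        PySem.Dict.empty.insert "common_all"
          ((PySem.List.slice (PySem.Dict.mk L).keys (some 1) none).foldl
            (fun c ds => PySem.Set.inter c ((PySem.Dict.mk L).getD ds []))
            ((PySem.Dict.mk L).getD (PySem.List.pyGetD (PySem.Dict.mk L).keys 0 "") []))
      else PySem.Dict.empty)
      = (if 2 ≤ (PySem.Dict.mk L).keys.length then
        PySem.Dict.empty.insert "common_all"
          (((PySem.Dict.mk L).getD (PySem.List.pyGetD (PySem.Dict.mk L).keys 0 "") []).filter
            (fun p => ((pvOwners L).getD p []).length == (PySem.Dict.mk L).keys.length))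
      else PySem.Dict.empty) := by
    by_cases hlen : 2 ≤ (PySem.Dict.mk L).keys.length
    · rw [if_pos hlen, if_pos hlen]
      cases L with
      | nil => simp [PySem.Dict.keys] at hlen
      | cons e rest =>
        congr 1
        have hK : (PySem.Dict.mk (e :: rest)).keys = e.1 :: rest.map Prod.fst := rfl
        rw [hK, PySem.List.slice_from _ (by norm_num), pv_pyGetD_zero]
        simp only [List.getD_cons_zero, Int.toNat_one, List.drop_succ_cons, List.drop_zero]
        rw [pv_getD_mem hk (show (e.1, e.2) ∈ e :: rest from List.mem_cons_self)]
        rw [pv_inter_fold]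
        apply List.filter_congr
        intro p hp
        rw [pv_owners_getD _ hk hv, pv_owners_len]
        have h := pv_common_pt e rest hk p hp
        simpa using h
    · rw [if_neg hlen, if_neg hlen]
  have h2 : ∀ r : PySem.Dict String (List String),
      (PySem.List.enumerate (PySem.Dict.mk L).keys).foldl
        (fun r q =>
          (PySem.List.slice (PySem.Dict.mk L).keys (some (q.1 + 1)) none).foldl
            (fun r ds2 =>
              r.insert ("common_" ++ q.2 ++ "_" ++ ds2)
                (PySem.Set.inter ((PySem.Dict.mk L).getD q.2 [])
                  ((PySem.Dict.mk L).getD ds2 [])))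
            r)
        r
      = (PySem.List.enumerate (PySem.Dict.mk L).keys).foldl
        (fun r q =>
          (PySem.List.slice (PySem.Dict.mk L).keys (some (q.1 + 1)) none).foldl
            (fun r ds2 =>
              r.insert ("common_" ++ q.2 ++ "_" ++ ds2)
                (((PySem.Dict.mk L).getD q.2 []).filter
                  (fun p => PySem.Set.contains ((pvOwners L).getD p []) ds2)))
            r)
        r := by
    intro r
    apply PySem.List.foldl_congr_mem
    intro acc q hq
    apply PySem.List.foldl_congr_mem
    intro acc2 ds2 hds2
    congr 1
    have hq2 : q.2 ∈ (PySem.Dict.mk L).keys := by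
      obtain ⟨k, hlt, rfl⟩ := (PySem.List.mem_enumerate_iff _ _ _).mp hq
      exact List.getElem_mem hlt
    have hds2' : ds2 ∈ (PySem.Dict.mk L).keys := PySem.List.mem_of_mem_slice _ _ _ hds2
    obtain ⟨s1, hs1⟩ := pv_mem_keys hq2
    obtain ⟨s2, hs2⟩ := pv_mem_keys hds2'
    rw [pv_getD_mem hk hs1, pv_getD_mem hk hs2]
    rw [show PySem.Set.inter s1 s2 = s1.filter (fun x => s2.contains x) from rfl]
    apply List.filter_congr
    intro p _
    rw [pv_owners_getD L hk hv]
    exact pv_pair_pt L hk hs2 p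
  have h3 : ∀ r : PySem.Dict String (List String),
      (PySem.Dict.mk L).keys.foldl
        (fun r ds =>
          r.insert ("unique_" ++ ds)
            (PySem.Set.diff ((PySem.Dict.mk L).getD ds [])
              ((PySem.Dict.mk L).keys.foldl
                (fun o other =>
                  if other ≠ ds then PySem.Set.union o ((PySem.Dict.mk L).getD other []) else o)
                PySem.Set.empty)))
        r
      = (PySem.Dict.mk L).keys.foldl
        (fun r ds =>
          r.insert ("unique_" ++ ds)
            (((PySem.Dict.mk L).getD ds []).filter
              (fun p => ((pvOwners L).getD p []).length == 1)))
        r := by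
    intro r
    apply PySem.List.foldl_congr_mem
    intro acc ds hds
    congr 1
    obtain ⟨s, hs⟩ := pv_mem_keys hds
    rw [pv_getD_mem hk hs]
    rw [show ∀ u : List String, PySem.Set.diff s u = s.filter (fun x => !u.contains x) from
      fun u => rfl]
    apply List.filter_congr
    intro p hp
    set F := (PySem.Dict.mk L).keys.foldl
      (fun o other =>
        if other ≠ ds then PySem.Set.union o ((PySem.Dict.mk L).getD other []) else o)
      PySem.Set.empty with hF
    have hoth : ∀ x : String, (x ∈ F) ↔ ∃ a ∈ L, a.1 ≠ ds ∧ x ∈ a.2 := by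
      intro x
      rw [hF, pv_union_fold]
      constructor
      · rintro (h | ⟨k, hkK, hne, hx⟩)
        · simp [PySem.Set.empty] at h
        · obtain ⟨sk, hsk⟩ := pv_mem_keys hkK
          rw [pv_getD_mem hk hsk] at hx
          exact ⟨(k, sk), hsk, hne, hx⟩
      · rintro ⟨a, ha, hane, hax⟩
        refine Or.inr ⟨a.1, List.mem_map.mpr ⟨a, ha, rfl⟩, hane, ?_⟩
        rw [pv_getD_mem hk (show (a.1, a.2) ∈ L from ha)]
        exact hax
    rw [pv_owners_getD L hk hv, pv_owners_len, Bool.eq_iff_iff, beq_iff_eq,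
      pv_unique_pt L hk hs p hp]
    constructor
    · intro hb hex
      have hmem : p ∈ F := (hoth p).mpr hex
      exact absurd hb (by simp [hmem])
    · intro hno
      have hmem : p ∉ F := fun hm => hno ((hoth p).mp hm)
      simp [hmem]
  rw [h1, h2, h3]

theorem compare_pattern_sets_spec : Claim_equal_compare_pattern_sets := by
  intro l _ hpre
  obtain ⟨hk, hv⟩ := hpre
  unfold Spec_compare_pattern_sets compare_pattern_sets compare_pattern_sets_alt
  rw [pv_ofList_eq hk]
  exact pv_main l hk hv
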